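-- pv_equiv track=rewrite | github.com/GabrieleBattaglia/Dadillo | Dadillo.py | Coppie
-- ===== SOURCE A (Python) =====
-- import itertools, time, sys, json, functools
--
-- def Coppie(g,pi,k,n=""):
-- 	'''riceve giocatori, lista partite incomplete e la chiave per il dizionario delle pi
-- 	aggiunge abbinamenti (solo quelli che includono il nuovo giocatore se n è non vuota)'''
-- 	for j in itertools.permutations(g.keys(),2):
-- 		if n!="":
-- 			if n in j:
-- 				pi[k]=j
-- 				k+=1
-- 		else:
-- 			pi[k]=j
-- 			k+=1
-- 	return pi
-- ===== SOURCE B (Python) =====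
-- def Coppie(g, pi, k, n=""):
--     ks = list(g.keys())
--     if n != "":
--         if n in ks:
--             p = ks.index(n)
--             pairs = [(x, n) for x in ks[:p]] \
--                   + [(n, b) for b in ks if b != n] \
--                   + [(x, n) for x in ks[p+1:]]
--         else:
--             pairs = []
--     else:
--         pairs = [(a, b) for a in ks for b in ks if b != a]
--     for i, pr in enumerate(pairs):
--         pi[k + i] = pr
--     return pi
-- ===== Notes on version B (the rewrite author's own statement) =====
-- stated objective: faster
-- what changed: When n is set, B emits only the pairs involving n by a single pass over the key list (prefix pairs (x,n), then (n,b) for every other key, then suffix pairs (x,n)) and numbers them with enumerate, instead of A's scan over all m*(m-1) permutations filtering each pair; the n-empty case stays a full pair comprehension.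
import Mathlib
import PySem

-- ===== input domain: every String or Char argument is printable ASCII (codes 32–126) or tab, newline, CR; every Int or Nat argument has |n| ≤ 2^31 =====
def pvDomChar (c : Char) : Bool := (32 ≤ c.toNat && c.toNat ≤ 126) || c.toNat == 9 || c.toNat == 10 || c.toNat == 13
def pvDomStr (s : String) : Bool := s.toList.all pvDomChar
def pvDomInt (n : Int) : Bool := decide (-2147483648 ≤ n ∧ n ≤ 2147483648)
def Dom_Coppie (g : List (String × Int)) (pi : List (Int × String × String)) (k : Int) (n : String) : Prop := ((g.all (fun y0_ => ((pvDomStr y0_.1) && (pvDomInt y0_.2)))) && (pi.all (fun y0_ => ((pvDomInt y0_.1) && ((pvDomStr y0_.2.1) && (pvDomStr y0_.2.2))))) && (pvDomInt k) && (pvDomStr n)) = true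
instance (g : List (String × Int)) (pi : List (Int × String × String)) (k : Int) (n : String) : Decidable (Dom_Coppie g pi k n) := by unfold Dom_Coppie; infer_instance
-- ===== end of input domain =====

-- ===== PORT A =====
-- B replaces A's quadratic scan (when n is set) by a single pass emitting only the
-- pairs that involve n, in the same order; objective: faster on the n-set case.
-- (Both A and B mutate the caller's dict pi in place; the equivalence is about the returned dict.)
-- itertools.permutations(ks, 2): ks = list(g.keys()) is duplicate-free, so pairs at
-- distinct positions are exactly the pairs of distinct values, in the same order.
def Coppie (g : List (String × Int)) (pi : List (Int × String × String)) (k : Int) (n : String) : List (Int × String × String) :=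
  let ks := PySem.List.dedup (g.map (·.1))
  let perms := ks.flatMap (fun a => (ks.filter (fun b => b ≠ a)).map (fun b => (a, b)))
  (perms.foldl (fun (st : PySem.Dict Int (String × String) × Int) j =>
      if n ≠ "" then
        if n = j.1 ∨ n = j.2 then (st.1.insert st.2 j, st.2 + 1) else st
      else (st.1.insert st.2 j, st.2 + 1))
    (PySem.Dict.ofList pi, k)).1.items

-- ===== PORT B =====
-- ks[:p] / ks[p+1:] with 0 ≤ p < ks.length are exactly take p / drop (p+1).
def Coppie_alt (g : List (String × Int)) (pi : List (Int × String × String)) (k : Int) (n : String) : List (Int × String × String) :=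
  let ks := PySem.List.dedup (g.map (·.1))
  let pairs : List (String × String) :=
    if n ≠ "" then
      match PySem.List.index? ks n with
      | some p =>
          (ks.take p).map (fun x => (x, n))
          ++ (ks.filter (fun b => b ≠ n)).map (fun b => (n, b))
          ++ (ks.drop (p + 1)).map (fun x => (x, n))
      | none => []
    else ks.flatMap (fun a => (ks.filter (fun b => b ≠ a)).map (fun b => (a, b)))
  ((PySem.List.enumerate pairs).foldl (fun d ip => d.insert (k + ip.1) ip.2)
    (PySem.Dict.ofList pi)).items

-- ===== PRECONDITION & SPEC =====
def Spec_Coppie (g : List (String × Int)) (pi : List (Int × String × String)) (k : Int) (n : String) (out : List (Int × String × String)) : Prop := out = Coppie_alt g pi k n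
instance (g : List (String × Int)) (pi : List (Int × String × String)) (k : Int) (n : String) (out : List (Int × String × String)) : Decidable (Spec_Coppie g pi k n out) := by unfold Spec_Coppie; infer_instance

-- ===== CLAIM (what is proved, stated in full; the proofs are below) =====
def Claim_equal_Coppie : Prop := ∀ (g : List (String × Int)) (pi : List (Int × String × String)) (k : Int) (n : String), Dom_Coppie g pi k n → Spec_Coppie g pi k n (Coppie g pi k n)

-- ===== LEMMAS AND PROOFS =====
-- the insertion loop 'pi[k] = j; k += 1' over a filtered pair stream = the plain loop over the filter
theorem foldl_ite_filter (n : String) :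
    ∀ (l : List (String × String)) (st : PySem.Dict Int (String × String) × Int),
      l.foldl (fun st j => if n = j.1 ∨ n = j.2 then (st.1.insert st.2 j, st.2 + 1) else st) st
      = (l.filter (fun j => decide (n = j.1 ∨ n = j.2))).foldl
          (fun st j => (st.1.insert st.2 j, st.2 + 1)) st := by
  intro l
  induction l with
  | nil => intro st; rfl
  | cons x xs ih =>
      intro st
      by_cases h : n = x.1 ∨ n = x.2 <;>
        simp only [List.foldl_cons, List.filter_cons, h, decide_true, decide_false,
          Bool.false_eq_true, if_false, if_true] <;>
        exact ih _

-- B's 'for i, pr in enumerate(pairs): pi[k+i] = pr' = A's counter-carrying loop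
theorem enum_fold :
    ∀ (l : List (String × String)) (s : Int) (d : PySem.Dict Int (String × String)) (k : Int),
      (PySem.List.enumerate l s).foldl (fun d ip => d.insert (k + ip.1) ip.2) d
      = (l.foldl (fun (st : PySem.Dict Int (String × String) × Int) j =>
            (st.1.insert st.2 j, st.2 + 1)) (d, k + s)).1 := by
  intro l
  induction l with
  | nil => intro s d k; rfl
  | cons x xs ih =>
      intro s d k
      rw [PySem.List.enumerate_cons]
      simp only [List.foldl_cons]
      rw [ih (s + 1) (d.insert (k + s) x) k]
      have : k + (s + 1) = k + s + 1 := by ring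
      rw [this]

theorem flatMap_eq_map_of {α β : Type} (l : List α) (g : α → List β) (f : α → β)
    (h : ∀ a ∈ l, g a = [f a]) : l.flatMap g = l.map f := by
  induction l with
  | nil => rfl
  | cons x xs ih =>
      simp only [List.flatMap_cons, List.map_cons, h x (by simp)]
      rw [ih (fun a ha => h a (by simp [ha]))]
      rfl

theorem flatMap_eq_nil_of {α β : Type} (l : List α) (g : α → List β)
    (h : ∀ a ∈ l, g a = []) : l.flatMap g = [] := by
  induction l with
  | nil => rfl
  | cons x xs ih =>
      simp only [List.flatMap_cons, h x (by simp)]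
      exact ih (fun a ha => h a (by simp [ha]))

theorem filter_eq_singleton {ks : List String} {n : String}
    (hnd : ks.Nodup) (hm : n ∈ ks) :
    ks.filter (fun b => decide (n = b)) = [n] := by
  induction ks with
  | nil => cases hm
  | cons x xs ih =>
      rcases List.mem_cons.mp hm with h | h
      · subst h
        have hx : n ∉ xs := (List.nodup_cons.mp hnd).1
        have : xs.filter (fun b => decide (n = b)) = [] := by
          apply List.filter_eq_nil_iff.mpr
          intro b hb
          simp only [decide_eq_true_eq]
          rintro rfl; exact hx hb
        simp [this]
      · have hx : x ≠ n := by
          rintro rfl; exact (List.nodup_cons.mp hnd).1 h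
        have := ih (List.nodup_cons.mp hnd).2 h
        rw [List.filter_cons_of_neg (by simpa using fun hc => absurd hc.symm hx), this]

-- one source key a ≠ n contributes exactly the pair (a, n) once n ∈ ks
theorem inner_single {ks : List String} (hnd : ks.Nodup) {n a : String}
    (hm : n ∈ ks) (hne : n ≠ a) :
    ((ks.filter (fun b => b ≠ a)).map (fun b => (a, b))).filter
        (fun j => decide (n = j.1 ∨ n = j.2)) = [(a, n)] := by
  rw [List.filter_map, List.filter_filter]
  have hc : ks.filter (fun b => ((fun j => decide (n = j.1 ∨ n = j.2)) ∘ (fun b => (a, b))) b && decide (b ≠ a))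
      = ks.filter (fun b => decide (n = b)) := by
    apply List.filter_congr
    intro b _
    by_cases hb : n = b
    · subst hb; simp [hne]
    · simp [hb, hne]
  rw [hc, filter_eq_singleton hnd hm]
  rfl

theorem inner_all (ks : List String) (n : String) :
    ((ks.filter (fun b => b ≠ n)).map (fun b => (n, b))).filter
        (fun j => decide (n = j.1 ∨ n = j.2))
    = (ks.filter (fun b => b ≠ n)).map (fun b => (n, b)) := by
  apply List.filter_eq_self.mpr
  intro j hj
  rcases List.mem_map.mp hj with ⟨b, _, rfl⟩
  simp

theorem inner_nil {ks : List String} {n : String} (hn : n ∉ ks) {a : String} (ha : a ∈ ks) :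
    ((ks.filter (fun b => b ≠ a)).map (fun b => (a, b))).filter
        (fun j => decide (n = j.1 ∨ n = j.2)) = [] := by
  apply List.filter_eq_nil_iff.mpr
  intro j hj
  rcases List.mem_map.mp hj with ⟨b, hb, rfl⟩
  have hbk : b ∈ ks := List.mem_of_mem_filter hb
  have hna : n ≠ a := by rintro rfl; exact hn ha
  simp only [decide_eq_true_eq]
  rintro (rfl | rfl)
  · exact hna rfl
  · exact hn hbk

-- the filtered permutation list IS B's single-pass pair list
theorem pairs_eq (ks : List String) (hnd : ks.Nodup) (n : String) :
    (ks.flatMap (fun a => (ks.filter (fun b => b ≠ a)).map (fun b => (a, b)))).filter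
        (fun j => decide (n = j.1 ∨ n = j.2))
    = match PySem.List.index? ks n with
      | some p =>
          (ks.take p).map (fun x => (x, n))
          ++ (ks.filter (fun b => b ≠ n)).map (fun b => (n, b))
          ++ (ks.drop (p + 1)).map (fun x => (x, n))
      | none => [] := by
  cases h : PySem.List.index? ks n with
  | none =>
      have hn : n ∉ ks := (PySem.List.index?_eq_none_iff ks n).mp h
      rw [List.filter_flatMap]
      exact flatMap_eq_nil_of _ _ (fun a ha => inner_nil hn ha)
  | some p =>
      obtain ⟨pre, suf, hks, hlen, hnpre⟩ := (PySem.List.index?_eq_some_iff ks n p).mp h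
      subst hks
      have hm : n ∈ pre ++ n :: suf := by simp
      have hnsuf : n ∉ suf := by
        have := hnd
        simp [List.nodup_append] at this
        exact this.2.1.1
      rw [List.filter_flatMap, List.flatMap_append, List.flatMap_cons]
      have h1 : pre.flatMap (fun a => ((pre ++ n :: suf).filter (fun b => b ≠ a)).map (fun b => (a, b)) |>.filter (fun j => decide (n = j.1 ∨ n = j.2)))
          = pre.map (fun x => (x, n)) :=
        flatMap_eq_map_of _ _ _ (fun a ha =>
          inner_single hnd hm (by rintro rfl; exact hnpre ha))
      have h3 : suf.flatMap (fun a => ((pre ++ n :: suf).filter (fun b => b ≠ a)).map (fun b => (a, b)) |>.filter (fun j => decide (n = j.1 ∨ n = j.2)))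
          = suf.map (fun x => (x, n)) :=
        flatMap_eq_map_of _ _ _ (fun a ha =>
          inner_single hnd hm (by rintro rfl; exact hnsuf ha))
      have htake : (pre ++ n :: suf).take p = pre := List.take_left' hlen
      have hdrop : (pre ++ n :: suf).drop (p + 1) = suf := by
        have : pre ++ n :: suf = (pre ++ [n]) ++ suf := by simp
        rw [this, List.drop_left' (by simp [hlen])]
      rw [h1, h3, inner_all]
      simp [htake, hdrop]

-- ===== VERDICT (by name: the statement is the Claim_ definition above) =====
theorem Coppie_spec : Claim_equal_Coppie := by
  intro g pi k n _
  unfold Spec_Coppie Coppie Coppie_alt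
  have hnd : (PySem.List.dedup (g.map (·.1))).Nodup := PySem.List.nodup_dedup _
  by_cases hn : n = ""
  · subst hn
    simp only [ne_eq, not_true_eq_false, if_false]
    rw [enum_fold _ 0 _ k]
    norm_num
  · simp only [ne_eq, hn, not_false_eq_true, if_true]
    rw [enum_fold _ 0 _ k, foldl_ite_filter n, pairs_eq _ hnd n]
    norm_num
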